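-- pv_equiv track=rewrite | github.com/dummassdenzel/Klair-AI | ai/services/document_processor/extraction/text_extractor.py | build_layout_aware_preview
-- ===== SOURCE A (Python) =====
-- def build_layout_aware_preview(text: str, max_chars: int = 500) -> str:
--     """
--     Build a stable preview from layout-marked extracted text.
--
--     When PDF extraction includes [Region: ...] markers, taking the first N chars
--     can hide the right-side panel (e.g. REFERENCES) behind long left/body text.
--     This composes a preview by taking small slices from each region in a fixed
--     order for Page 1: full → left → right.
--     """
--     if not text:
--         return ""
--     if "[Region:" not in text or "[Page 1]" not in text:
--         return (text[:max_chars] if len(text) > max_chars else text).strip()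
--
--     # Extract the first page only for preview composition.
--     page1 = text.split("[Page 1]", 1)[1]
--     if "\n\n[Page " in page1:
--         page1 = page1.split("\n\n[Page ", 1)[0]
--
--     def _grab(region: str) -> str:
--         token = f"[Region: {region}]"
--         if token not in page1:
--             return ""
--         seg = page1.split(token, 1)[1]
--         seg = seg.split("[Region:", 1)[0]
--         return seg.strip()
--
--     full = _grab("full")
--     left = _grab("left")
--     right = _grab("right")
--
--     # Budget so right panel is visible when present.
--     full_budget = int(max_chars * 0.40)
--     side_budget = int(max_chars * 0.28)
--     right_budget = max_chars - (len("[Page 1]\n[Region: full]\n") + full_budget + len("\n[Region: left]\n") + side_budget + len("\n[Region: right]\n"))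
--     right_budget = max(80, min(int(max_chars * 0.32), right_budget))
--
--     parts = ["[Page 1]"]
--     if full:
--         parts.extend(["[Region: full]", full[:full_budget].rstrip()])
--     if left:
--         parts.extend(["[Region: left]", left[:side_budget].rstrip()])
--     if right:
--         parts.extend(["[Region: right]", right[:right_budget].rstrip()])
--
--     composed = "\n".join(p for p in parts if p).strip()
--     if len(composed) > max_chars:
--         composed = composed[:max_chars].rstrip()
--     return composed
-- ===== SOURCE B (Python) =====
-- def build_layout_aware_preview(text: str, max_chars: int = 500) -> str:
--     """Region-aware preview: index page-1 regions in one split pass, then compose."""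
--     if "[Region:" not in text or "[Page 1]" not in text:
--         return (text[:max_chars] if len(text) > max_chars else text).strip()
--
--     # First page only; split(sep, 1)[0] is the whole string when sep is absent.
--     page1 = text.split("[Page 1]", 1)[1].split("\n\n[Page ", 1)[0]
--
--     # One pass over page1: map region name (with its leading space) to its
--     # stripped segment, keeping the first occurrence of each name.
--     regions = {}
--     for chunk in page1.split("[Region:")[1:]:
--         close = chunk.find("]")
--         if close != -1:
--             regions.setdefault(chunk[:close], chunk[close + 1:].strip())
--
--     full_budget = int(max_chars * 0.40)
--     side_budget = int(max_chars * 0.28)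
--     right_budget = max(80, min(int(max_chars * 0.32),
--                                max_chars - 57 - full_budget - side_budget))
--
--     parts = ["[Page 1]"]
--     for name, budget in (("full", full_budget), ("left", side_budget), ("right", right_budget)):
--         seg = regions.get(" " + name, "")
--         if seg:
--             parts.append("[Region: " + name + "]")
--             trimmed = seg[:budget].rstrip()
--             if trimmed:
--                 parts.append(trimmed)
--
--     composed = "\n".join(parts).strip()
--     if len(composed) > max_chars:
--         composed = composed[:max_chars].rstrip()
--     return composed
-- ===== Notes on version B (the rewrite author's own statement) =====
-- stated objective: idiomatic
-- what changed: A's _grab rescans page 1 once per region (three token searches plus a split each); B parses page 1 once, splitting on the region marker and indexing every region's stripped segment in a dict keyed by region name (first occurrence wins, via setdefault), then composes the preview from dict lookups through a data-driven loop over (name, budget) pairs; the guard, budget arithmetic and final truncation are unchanged.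
import Mathlib
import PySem

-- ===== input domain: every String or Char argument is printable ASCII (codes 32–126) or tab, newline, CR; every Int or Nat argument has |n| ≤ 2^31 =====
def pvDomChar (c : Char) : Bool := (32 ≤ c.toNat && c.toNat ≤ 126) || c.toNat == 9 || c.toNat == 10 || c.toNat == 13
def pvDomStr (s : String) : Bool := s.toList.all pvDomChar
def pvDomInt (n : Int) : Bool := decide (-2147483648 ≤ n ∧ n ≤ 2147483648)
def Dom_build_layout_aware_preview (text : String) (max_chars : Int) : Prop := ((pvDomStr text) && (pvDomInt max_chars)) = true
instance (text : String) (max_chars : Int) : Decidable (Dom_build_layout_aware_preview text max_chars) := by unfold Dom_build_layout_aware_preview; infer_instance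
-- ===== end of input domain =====

-- B replaces A's three repeated token-scans of page 1 (`_grab`) by one split pass that indexes
-- every region segment in a dict, then composes the preview from lookups (objective: idiomatic).


-- ===== PORT A =====

-- Exact hand port of Python's `int(n * c)` where `c = p / 2 ^ k` is an IEEE-754 double
-- (used for the literals 0.40, 0.28, 0.32; PySem has no floats).  The exact product
-- `n * p / 2 ^ k` is rounded to 53 significant bits (round-to-nearest, ties-to-even),
-- then truncated toward zero; exact for |n| ≤ 2^53, in particular on the whole domain.
def pyIntTimesFloat (n : Int) (p : Nat) (k : Nat) : Int :=
  let x : Nat := n.natAbs * p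
  if x = 0 then 0 else
  let bl := Nat.log2 x + 1          -- bit length of x
  let xr : Nat :=
    if bl ≤ 53 then x else
      let sh := bl - 53
      let q := x / 2 ^ sh
      let r := x % 2 ^ sh
      let half := 2 ^ (sh - 1)
      let q' := if half < r ∨ (r = half ∧ q % 2 = 1) then q + 1 else q
      q' * 2 ^ sh
  (if n < 0 then -1 else 1) * ((xr : Int) / (2 ^ k : Nat))

-- A's inner helper `_grab`
def pvGrabA (page1 : List Char) (region : List Char) : List Char :=
  let token := "[Region: ".toList ++ region ++ "]".toList
  if PySem.Chars.isIn token page1 = false then [] else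
  let seg := (PySem.Chars.splitOnMax page1 token 1).getD 1 []
  let seg := (PySem.Chars.splitOnMax seg "[Region:".toList 1).getD 0 []
  PySem.Chars.strip seg

def build_layout_aware_preview (text : String) (max_chars : Int) : String :=
  let s := text.toList
  if s = [] then "" else
  if (PySem.Chars.isIn "[Region:".toList s && PySem.Chars.isIn "[Page 1]".toList s) = false then
    String.ofList (PySem.Chars.strip (if max_chars < (s.length : Int) then PySem.List.slice s none (some max_chars) else s))
  else
    let page1 := (PySem.Chars.splitOnMax s "[Page 1]".toList 1).getD 1 []
    let page1 := if PySem.Chars.isIn "\n\n[Page ".toList page1 then (PySem.Chars.splitOnMax page1 "\n\n[Page ".toList 1).getD 0 [] else page1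
    let full := pvGrabA page1 "full".toList
    let left := pvGrabA page1 "left".toList
    let right := pvGrabA page1 "right".toList
    let full_budget := pyIntTimesFloat max_chars 3602879701896397 53
    let side_budget := pyIntTimesFloat max_chars 1261007895663739 52
    let right_budget := max_chars - (("[Page 1]\n[Region: full]\n".toList.length : Int) + full_budget + ("\n[Region: left]\n".toList.length : Int) + side_budget + ("\n[Region: right]\n".toList.length : Int))
    let right_budget := max 80 (min (pyIntTimesFloat max_chars 5764607523034235 54) right_budget)
    let parts := ["[Page 1]".toList]
    let parts := if full ≠ [] then parts ++ ["[Region: full]".toList, PySem.Chars.rstrip (PySem.List.slice full none (some full_budget))] else parts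
    let parts := if left ≠ [] then parts ++ ["[Region: left]".toList, PySem.Chars.rstrip (PySem.List.slice left none (some side_budget))] else parts
    let parts := if right ≠ [] then parts ++ ["[Region: right]".toList, PySem.Chars.rstrip (PySem.List.slice right none (some right_budget))] else parts
    let composed := PySem.Chars.strip (PySem.Chars.join "\n".toList (parts.filter (fun p => p ≠ [])))
    let composed := if max_chars < (composed.length : Int) then PySem.Chars.rstrip (PySem.List.slice composed none (some max_chars)) else composed
    String.ofList composed

-- ===== PORT B =====

-- B's single indexing pass: first occurrence of each region name wins (dict.setdefault)
def pvRegionIndex (page1 : List Char) : PySem.Dict (List Char) (List Char) :=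
  (PySem.List.slice (PySem.Chars.splitOn page1 "[Region:".toList) (some 1) none).foldl
    (fun regions chunk =>
      let close := PySem.Chars.find chunk "]".toList
      if close ≠ -1 then
        PySem.Dict.setdefault regions (PySem.List.slice chunk none (some close))
          (PySem.Chars.strip (PySem.List.slice chunk (some (close + 1)) none))
      else regions)
    PySem.Dict.empty

def build_layout_aware_preview_alt (text : String) (max_chars : Int) : String :=
  let s := text.toList
  if (PySem.Chars.isIn "[Region:".toList s && PySem.Chars.isIn "[Page 1]".toList s) = false then
    String.ofList (PySem.Chars.strip (if max_chars < (s.length : Int) then PySem.List.slice s none (some max_chars) else s))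
  else
    let page1 := (PySem.Chars.splitOnMax ((PySem.Chars.splitOnMax s "[Page 1]".toList 1).getD 1 []) "\n\n[Page ".toList 1).getD 0 []
    let regions := pvRegionIndex page1
    let full_budget := pyIntTimesFloat max_chars 3602879701896397 53
    let side_budget := pyIntTimesFloat max_chars 1261007895663739 52
    let right_budget := max 80 (min (pyIntTimesFloat max_chars 5764607523034235 54) (max_chars - 57 - full_budget - side_budget))
    let parts := [("full".toList, full_budget), ("left".toList, side_budget), ("right".toList, right_budget)].foldl
      (fun parts nb =>
        let seg := PySem.Dict.getD regions (" ".toList ++ nb.1) []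
        if seg ≠ [] then
          let parts := parts ++ ["[Region: ".toList ++ nb.1 ++ "]".toList]
          let trimmed := PySem.Chars.rstrip (PySem.List.slice seg none (some nb.2))
          if trimmed ≠ [] then parts ++ [trimmed] else parts
        else parts)
      ["[Page 1]".toList]
    let composed := PySem.Chars.strip (PySem.Chars.join "\n".toList parts)
    let composed := if max_chars < (composed.length : Int) then PySem.Chars.rstrip (PySem.List.slice composed none (some max_chars)) else composed
    String.ofList composed

-- ===== PRECONDITION & SPEC =====
def Spec_build_layout_aware_preview (text : String) (max_chars : Int) (out : String) : Prop := out = build_layout_aware_preview_alt text max_chars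
instance (text : String) (max_chars : Int) (out : String) : Decidable (Spec_build_layout_aware_preview text max_chars out) := by unfold Spec_build_layout_aware_preview; infer_instance

-- ===== CLAIM (what is proved, stated in full; the proofs are below) =====
def Claim_equal_build_layout_aware_preview : Prop := ∀ (text : String) (max_chars : Int), Dom_build_layout_aware_preview text max_chars → Spec_build_layout_aware_preview text max_chars (build_layout_aware_preview text max_chars)

-- ===== LEMMAS AND PROOFS =====

/-- The separator `"[Region:"` as an explicit character list. -/
def pvSep : List Char := ['[', 'R', 'e', 'g', 'i', 'o', 'n', ':']

/-- The full marker `"[Region: <key>]"` searched for by A, where `key` is the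
region name preceded by one space. -/
def pvToken (key : List Char) : List Char := pvSep ++ key ++ [']']

/-- `i` is the index of the first occurrence of `sub` in `s`. -/
def FirstOccPV (sub s : List Char) (i : Nat) : Prop :=
  sub <+: s.drop i ∧ ∀ j < i, ¬ sub <+: s.drop j

/-- `t.split("[Region:", 1)[0]`: `t` cut at the first `"[Region:"`. -/
def cutSepPV (t : List Char) : List Char :=
  if 0 ≤ PySem.Chars.find t pvSep then t.take (PySem.Chars.find t pvSep).toNat else t

/-- The value B's dict records for `key`: the first region chunk whose name is `key`. -/
def firstMatchPV (key : List Char) : List (List Char) → List Char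
  | [] => []
  | c :: cs =>
      let close := PySem.Chars.find c "]".toList
      if close ≠ -1 ∧ PySem.List.slice c none (some close) = key
      then PySem.Chars.strip (PySem.List.slice c (some (close + 1)) none)
      else firstMatchPV key cs

/-- Extend the first element of a split-chunk list (shape of `splitOn.go`'s accumulator). -/
def pvPrepend (pre : List Char) : List (List Char) → List (List Char)
  | [] => [pre]
  | x :: xs => (pre ++ x) :: xs

/-- A's `_grab` written with `find` instead of `split`. -/
def grabExpPV (page1 key : List Char) : List Char :=
  if 0 ≤ PySem.Chars.find page1 (pvToken key) then
    PySem.Chars.strip (cutSepPV (page1.drop ((PySem.Chars.find page1 (pvToken key)).toNat + (pvToken key).length)))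
  else []

/-- What `_grab` computes on the text `u` following a `"[Region:"` marker. -/
def auxSpecPV (u key : List Char) : List Char :=
  if (key ++ [']']) <+: u then PySem.Chars.strip (cutSepPV (u.drop (key.length + 1)))
  else grabExpPV u key

lemma pvSep_eq : "[Region:".toList = pvSep := by decide

lemma pvInfix_exists (sub s : List Char) : sub <:+: s ↔ ∃ j, sub <+: s.drop j := by
  rw [← PySem.Chars.isIn_iff_infix, ← PySem.Chars.exists_prefix_drop_iff_isIn]

lemma pvNotInfix_drop {sub u : List Char} (h : ¬ sub <:+: u) (m : Nat) : ¬ sub <:+: u.drop m := by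
  intro h2
  exact h (h2.trans (List.drop_suffix m u).isInfix)

lemma pvFindGo (sub l : List Char) : ∀ (k : Nat),
    PySem.Chars.find.go sub l k =
      if 0 ≤ PySem.Chars.find l sub then (k : Int) + PySem.Chars.find l sub else -1 := by
  induction l with
  | nil =>
    intro k
    by_cases he : sub.isEmpty <;>
      simp [PySem.Chars.find, PySem.Chars.find.go, he]
  | cons c rest ih =>
    intro k
    have e0 : ∀ m : Nat, PySem.Chars.find.go sub (c :: rest) m =
        if sub.isPrefixOf (c :: rest) = true then (m : Int) else PySem.Chars.find.go sub rest (m + 1) := by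
      intro m; simp [PySem.Chars.find.go]
    have hfind : PySem.Chars.find (c :: rest) sub =
        if sub.isPrefixOf (c :: rest) = true then (0 : Int) else PySem.Chars.find.go sub rest 1 := e0 0
    by_cases hp : sub.isPrefixOf (c :: rest) = true
    · rw [e0 k, if_pos hp, hfind, if_pos hp]
      simp
    · rw [e0 k, if_neg hp, hfind, if_neg hp, ih (k + 1), ih 1]
      split_ifs <;> push_cast <;> omega

lemma pvFindCons (sub rest : List Char) (c : Char) (hpre : ¬ sub <+: (c :: rest)) :
    PySem.Chars.find (c :: rest) sub =
      if 0 ≤ PySem.Chars.find rest sub then PySem.Chars.find rest sub + 1 else -1 := by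
  have hb : ¬ sub.isPrefixOf (c :: rest) = true := by
    simpa [List.isPrefixOf_iff_prefix] using hpre
  have e0 : PySem.Chars.find (c :: rest) sub =
      if sub.isPrefixOf (c :: rest) = true then (0 : Int) else PySem.Chars.find.go sub rest 1 := by
    simp [PySem.Chars.find, PySem.Chars.find.go]
  rw [e0, if_neg hb, pvFindGo]
  split_ifs <;> omega

lemma pvFind_eq {sub s : List Char} {i : Nat} (h : FirstOccPV sub s i) :
    PySem.Chars.find s sub = (i : Int) := by
  have hin : sub <:+: s := (pvInfix_exists sub s).mpr ⟨i, h.1⟩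
  have hnn : 0 ≤ PySem.Chars.find s sub := (PySem.Chars.find_nonneg_iff s sub).mpr hin
  obtain ⟨h1, h2⟩ := PySem.Chars.find_spec hnn
  have : (PySem.Chars.find s sub).toNat = i := by
    rcases lt_trichotomy (PySem.Chars.find s sub).toNat i with hlt | heq | hgt
    · exact absurd h1 (h.2 _ hlt)
    · exact heq
    · exact absurd h.1 (h2 _ hgt)
  omega

lemma pvFirstOcc_of_infix {sub s : List Char} (h : sub <:+: s) :
    FirstOccPV sub s (PySem.Chars.find s sub).toNat := by
  have hnn : 0 ≤ PySem.Chars.find s sub := (PySem.Chars.find_nonneg_iff s sub).mpr h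
  obtain ⟨h1, h2⟩ := PySem.Chars.find_spec hnn
  exact ⟨h1, h2⟩

lemma pvFirstOcc_drop_eq {sub s : List Char} {i : Nat} (h : FirstOccPV sub s i) :
    s.drop i = sub ++ s.drop (i + sub.length) := by
  obtain ⟨t, ht⟩ := h.1
  have h2 := congrArg (List.drop sub.length) ht
  simp only [List.drop_left, List.drop_drop] at h2
  rw [← ht, h2]

lemma pvFirstOcc_shift {sub s : List Char} {i m : Nat} (h : FirstOccPV sub s i) (hm : m ≤ i) :
    FirstOccPV sub (s.drop m) (i - m) := by
  constructor
  · have h1 := h.1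
    rw [List.drop_drop]
    have he : m + (i - m) = i := by omega
    rw [he]; exact h1
  · intro j hj hpre
    rw [List.drop_drop] at hpre
    exact h.2 (m + j) (by omega) hpre

lemma pvIsPrefixOf_false {l1 l2 : List Char} (h : ¬ l1 <+: l2) : l1.isPrefixOf l2 = false := by
  rw [Bool.eq_false_iff]
  exact fun hx => h (List.isPrefixOf_iff_prefix.mp hx)

lemma pvGoMax0 (sep : List Char) : ∀ (fuel : Nat) (l cur : List Char) (acc : List (List Char)),
    PySem.Chars.splitOnMax.go sep fuel 0 l cur acc = acc.reverse ++ [cur.reverse ++ l] := by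
  intro fuel l cur acc
  cases fuel with
  | zero => simp [PySem.Chars.splitOnMax.go]
  | succ fuel =>
    cases l with
    | nil => simp [PySem.Chars.splitOnMax.go]
    | cons c rest => simp [PySem.Chars.splitOnMax.go]

lemma pvGoMax1 (sep : List Char) (hsep : sep ≠ []) : ∀ (fuel : Nat) (l cur : List Char) (acc : List (List Char)),
    l.length < fuel →
    PySem.Chars.splitOnMax.go sep fuel 1 l cur acc =
      acc.reverse ++
        (if 0 ≤ PySem.Chars.find l sep then
          [cur.reverse ++ l.take (PySem.Chars.find l sep).toNat,
           l.drop ((PySem.Chars.find l sep).toNat + sep.length)]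
         else [cur.reverse ++ l]) := by
  intro fuel
  induction fuel with
  | zero => intro l cur acc h; omega
  | succ fuel ih =>
    intro l cur acc h
    cases l with
    | nil =>
      have hf : PySem.Chars.find ([] : List Char) sep = -1 := by
        cases sep with
        | nil => exact absurd rfl hsep
        | cons a t => simp [PySem.Chars.find, PySem.Chars.find.go]
      simp [PySem.Chars.splitOnMax.go, hf]
    | cons c rest =>
      by_cases hp : sep <+: (c :: rest)
      · have hb : sep.isPrefixOf (c :: rest) = true := List.isPrefixOf_iff_prefix.mpr hp
        have hf : PySem.Chars.find (c :: rest) sep = 0 :=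
          pvFind_eq ⟨by simpa using hp, fun j hj => absurd hj (Nat.not_lt_zero j)⟩
        have e0 : PySem.Chars.splitOnMax.go sep (fuel + 1) 1 (c :: rest) cur acc =
            PySem.Chars.splitOnMax.go sep fuel 0 (List.drop sep.length (c :: rest)) [] (cur.reverse :: acc) := by
          simp [PySem.Chars.splitOnMax.go, hb]
        rw [e0, pvGoMax0, hf, if_pos (le_refl (0:Int))]
        simp
      · have hb : sep.isPrefixOf (c :: rest) = false := pvIsPrefixOf_false hp
        have e0 : PySem.Chars.splitOnMax.go sep (fuel + 1) 1 (c :: rest) cur acc =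
            PySem.Chars.splitOnMax.go sep fuel 1 rest (c :: cur) acc := by
          simp [PySem.Chars.splitOnMax.go, hb]
        have hlen : rest.length < fuel := by simp only [List.length_cons] at h; omega
        rw [e0, ih rest (c :: cur) acc hlen, pvFindCons sep rest c hp]
        by_cases h3 : 0 ≤ PySem.Chars.find rest sep
        · have ht : (PySem.Chars.find rest sep + 1).toNat = (PySem.Chars.find rest sep).toNat + 1 := by
            omega
          have hd : (PySem.Chars.find rest sep).toNat + 1 + sep.length =
              ((PySem.Chars.find rest sep).toNat + sep.length) + 1 := by omega
          have hinner : (if 0 ≤ PySem.Chars.find rest sep then PySem.Chars.find rest sep + 1 else -1) =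
              PySem.Chars.find rest sep + 1 := if_pos h3
          rw [if_pos h3, hinner,
            if_pos (by omega : (0:Int) ≤ PySem.Chars.find rest sep + 1), ht, hd]
          simp [List.take_succ_cons, List.drop_succ_cons]
        · have hinner : (if 0 ≤ PySem.Chars.find rest sep then PySem.Chars.find rest sep + 1 else -1) =
              (-1 : Int) := if_neg h3
          rw [if_neg h3, hinner, if_neg (by omega : ¬ (0:Int) ≤ -1)]
          simp

lemma pvSplitMax1 (s sep : List Char) (hsep : sep ≠ []) :
    PySem.Chars.splitOnMax s sep 1 =
      if 0 ≤ PySem.Chars.find s sep then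
        [s.take (PySem.Chars.find s sep).toNat,
         s.drop ((PySem.Chars.find s sep).toNat + sep.length)]
      else [s] := by
  have e0 : PySem.Chars.splitOnMax s sep 1 =
      PySem.Chars.splitOnMax.go sep (s.length + 1) 1 s [] [] := by
    simp [PySem.Chars.splitOnMax]
  rw [e0, pvGoMax1 sep hsep (s.length + 1) s [] [] (by omega)]
  split_ifs <;> simp

lemma pvSplitMax1_neg {s sep : List Char} (hsep : sep ≠ []) (h : ¬ sep <:+: s) :
    PySem.Chars.splitOnMax s sep 1 = [s] := by
  have hf : PySem.Chars.find s sep = -1 := (PySem.Chars.find_eq_neg_one_iff s sep).mpr h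
  rw [pvSplitMax1 s sep hsep, hf, if_neg (by omega : ¬ (0:Int) ≤ -1)]

lemma pvSplitMax1_pos {s sep : List Char} {i : Nat} (hsep : sep ≠ []) (h : FirstOccPV sep s i) :
    PySem.Chars.splitOnMax s sep 1 = [s.take i, s.drop (i + sep.length)] := by
  have hf := pvFind_eq h
  rw [pvSplitMax1 s sep hsep, hf, if_pos (by omega : (0:Int) ≤ (i : Int))]
  simp

lemma pvGoSplit (sep : List Char) (hsep : sep ≠ []) : ∀ (fuel : Nat) (l cur : List Char) (acc : List (List Char)),
    l.length < fuel →
    PySem.Chars.splitOn.go sep fuel l cur acc =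
      acc.reverse ++ pvPrepend cur.reverse (PySem.Chars.splitOn l sep) := by
  have hstep_pos : ∀ (c : Char) (rest : List Char), sep.isPrefixOf (c :: rest) = true →
      PySem.Chars.splitOn (c :: rest) sep =
        PySem.Chars.splitOn.go sep ((c :: rest).length) (List.drop sep.length (c :: rest)) [] [[]] := by
    intro c rest hb
    have e2 : PySem.Chars.splitOn (c :: rest) sep =
        PySem.Chars.splitOn.go sep ((c :: rest).length + 1) (c :: rest) [] [] := rfl
    rw [e2]; simp [PySem.Chars.splitOn.go, hb]
  have hstep_neg : ∀ (c : Char) (rest : List Char), sep.isPrefixOf (c :: rest) = false →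
      PySem.Chars.splitOn (c :: rest) sep =
        PySem.Chars.splitOn.go sep ((c :: rest).length) rest [c] [] := by
    intro c rest hb
    have e2 : PySem.Chars.splitOn (c :: rest) sep =
        PySem.Chars.splitOn.go sep ((c :: rest).length + 1) (c :: rest) [] [] := rfl
    rw [e2]; simp [PySem.Chars.splitOn.go, hb]
  intro fuel
  induction fuel using Nat.strong_induction_on with
  | _ fuel ih =>
    intro l cur acc h
    cases fuel with
    | zero => omega
    | succ fuel' =>
      cases l with
      | nil =>
        have e1 : PySem.Chars.splitOn ([] : List Char) sep = [[]] := by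
          simp [PySem.Chars.splitOn, PySem.Chars.splitOn.go]
        simp [PySem.Chars.splitOn.go, e1, pvPrepend]
      | cons c rest =>
        have hlsep : 1 ≤ sep.length := by
          cases sep with
          | nil => exact absurd rfl hsep
          | cons a t => simp
        by_cases hp : sep <+: (c :: rest)
        · have hb : sep.isPrefixOf (c :: rest) = true := List.isPrefixOf_iff_prefix.mpr hp
          have hlen : (List.drop sep.length (c :: rest)).length < fuel' := by
            simp only [List.length_drop, List.length_cons] at *
            omega
          have e0 : PySem.Chars.splitOn.go sep (fuel' + 1) (c :: rest) cur acc =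
              PySem.Chars.splitOn.go sep fuel' (List.drop sep.length (c :: rest)) [] (cur.reverse :: acc) := by
            simp [PySem.Chars.splitOn.go, hb]
          have hlen2 : (List.drop sep.length (c :: rest)).length < (c :: rest).length := by
            simp only [List.length_drop, List.length_cons]
            omega
          rw [e0, ih fuel' (by omega) _ _ _ hlen]
          rw [hstep_pos c rest hb, ih ((c :: rest).length) (by omega) _ _ _ hlen2]
          simp [pvPrepend]
        · have hb : sep.isPrefixOf (c :: rest) = false := pvIsPrefixOf_false hp
          have e0 : PySem.Chars.splitOn.go sep (fuel' + 1) (c :: rest) cur acc =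
              PySem.Chars.splitOn.go sep fuel' rest (c :: cur) acc := by
            simp [PySem.Chars.splitOn.go, hb]
          have hlen : rest.length < fuel' := by simp only [List.length_cons] at h; omega
          rw [e0, ih fuel' (by omega) _ _ _ hlen]
          rw [hstep_neg c rest hb, ih ((c :: rest).length) (by omega) _ _ _ (by simp)]
          cases hY : PySem.Chars.splitOn rest sep <;> simp [pvPrepend]

lemma pvSplitOn_ne_nil (s sep : List Char) (hsep : sep ≠ []) : PySem.Chars.splitOn s sep ≠ [] := by
  intro hcon
  have h := pvGoSplit sep hsep (s.length + 1) s [] [] (by omega)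
  have e : PySem.Chars.splitOn s sep = [] ++ pvPrepend [] (PySem.Chars.splitOn s sep) := by
    simpa using h
  rw [hcon] at e
  simp [pvPrepend] at e

lemma pvSplitOn_neg {s sep : List Char} (hsep : sep ≠ []) (h : ¬ sep <:+: s) :
    PySem.Chars.splitOn s sep = [s] := by
  induction s with
  | nil => simp [PySem.Chars.splitOn, PySem.Chars.splitOn.go]
  | cons c rest ih =>
    have hp : ¬ sep <+: (c :: rest) := fun hx => h hx.isInfix
    have hb : sep.isPrefixOf (c :: rest) = false := pvIsPrefixOf_false hp
    have hrest : ¬ sep <:+: rest := fun hx => h (hx.trans (List.suffix_cons c rest).isInfix)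
    have e2 : PySem.Chars.splitOn (c :: rest) sep =
        PySem.Chars.splitOn.go sep ((c :: rest).length + 1) (c :: rest) [] [] := rfl
    rw [e2]
    have e3 : PySem.Chars.splitOn.go sep ((c :: rest).length + 1) (c :: rest) [] [] =
        PySem.Chars.splitOn.go sep ((c :: rest).length) rest [c] [] := by
      simp [PySem.Chars.splitOn.go, hb]
    rw [e3, pvGoSplit sep hsep ((c :: rest).length) rest [c] [] (by simp), ih hrest]
    simp [pvPrepend]

lemma pvSplitOn_pos (sep : List Char) (hsep : sep ≠ []) : ∀ (i : Nat) (s : List Char), FirstOccPV sep s i →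
    PySem.Chars.splitOn s sep = s.take i :: PySem.Chars.splitOn (s.drop (i + sep.length)) sep := by
  intro i
  induction i with
  | zero =>
    intro s hocc
    cases s with
    | nil =>
      have h1 : sep <+: ([] : List Char) := by simpa using hocc.1
      exact absurd (List.prefix_nil.mp h1) hsep
    | cons c rest =>
      have hp : sep <+: (c :: rest) := by simpa using hocc.1
      have hb : sep.isPrefixOf (c :: rest) = true := List.isPrefixOf_iff_prefix.mpr hp
      have hlsep : 1 ≤ sep.length := by
        cases sep with
        | nil => exact absurd rfl hsep
        | cons a t => simp
      have e2 : PySem.Chars.splitOn (c :: rest) sep =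
          PySem.Chars.splitOn.go sep ((c :: rest).length + 1) (c :: rest) [] [] := rfl
      have e3 : PySem.Chars.splitOn.go sep ((c :: rest).length + 1) (c :: rest) [] [] =
          PySem.Chars.splitOn.go sep ((c :: rest).length) (List.drop sep.length (c :: rest)) [] [[]] := by
        simp [PySem.Chars.splitOn.go, hb]
      rw [e2, e3, pvGoSplit sep hsep ((c :: rest).length) _ _ _
        (by simp only [List.length_drop, List.length_cons]; omega)]
      have hX := pvSplitOn_ne_nil (List.drop sep.length (c :: rest)) sep hsep
      cases hXc : PySem.Chars.splitOn (List.drop sep.length (c :: rest)) sep with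
      | nil => exact absurd hXc hX
      | cons x xs => simp [pvPrepend, hXc]
  | succ i ihi =>
    intro s hocc
    cases s with
    | nil =>
      have h1 : sep <+: ([] : List Char) := by simpa using hocc.1
      exact absurd (List.prefix_nil.mp h1) hsep
    | cons c rest =>
      have hp : ¬ sep <+: (c :: rest) := by
        have := hocc.2 0 (by omega)
        simpa using this
      have hb : sep.isPrefixOf (c :: rest) = false := pvIsPrefixOf_false hp
      have hocc' : FirstOccPV sep rest i := by
        constructor
        · have h1 := hocc.1
          simpa [List.drop_succ_cons] using h1
        · intro j hj hpre
          exact hocc.2 (j + 1) (by omega) (by simpa [List.drop_succ_cons] using hpre)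
      have e2 : PySem.Chars.splitOn (c :: rest) sep =
          PySem.Chars.splitOn.go sep ((c :: rest).length + 1) (c :: rest) [] [] := rfl
      have e3 : PySem.Chars.splitOn.go sep ((c :: rest).length + 1) (c :: rest) [] [] =
          PySem.Chars.splitOn.go sep ((c :: rest).length) rest [c] [] := by
        simp [PySem.Chars.splitOn.go, hb]
      rw [e2, e3, pvGoSplit sep hsep ((c :: rest).length) rest [c] [] (by simp), ihi rest hocc']
      have harith : i + 1 + sep.length = (i + sep.length) + 1 := by omega
      rw [harith]
      simp [pvPrepend, List.take_succ_cons, List.drop_succ_cons]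

lemma pvPrefixDrop_getElem? {x : Char} {t s : List Char} {j : Nat} (h : (x :: t) <+: s.drop j) :
    s[j]? = some x := by
  have h1 : (s.drop j).head? = some x := by
    obtain ⟨r, hr⟩ := h
    rw [← hr]; rfl
  rwa [List.head?_drop] at h1

lemma pvNoSepInSep (d : Nat) (v : List Char) (h1 : 1 ≤ d) (h2 : d < 8) :
    ¬ pvSep <+: (pvSep.drop d ++ v) := by
  intro hpre
  have hne : ('[' : Char) ≠ pvSep[d]! ∧ pvSep.drop d = pvSep[d]! :: pvSep.drop (d + 1) := by
    interval_cases d <;> exact ⟨by decide, by decide⟩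
  rw [hne.2, List.cons_append] at hpre
  have hh : ('[' : Char) = pvSep[d]! := by
    have h2 : ('[' :: pvSep.drop 1) <+: (pvSep[d]! :: (pvSep.drop (d + 1) ++ v)) := by
      rw [show ('[' :: pvSep.drop 1) = pvSep from by decide]
      exact hpre
    exact (List.cons_prefix_cons.mp h2).1
  exact hne.1 hh

lemma pvNoSepEarly {key u : List Char} (hk : '[' ∉ key) (hb : (key ++ [']']) <+: u) :
    ∀ j ≤ key.length, ¬ pvSep <+: u.drop j := by
  intro j hj hpre
  have hhead : u[j]? = some '[' := by
    have h2 : ('[' :: pvSep.drop 1) <+: u.drop j := by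
      rw [show ('[' :: pvSep.drop 1) = pvSep from by decide]
      exact hpre
    exact pvPrefixDrop_getElem? h2
  obtain ⟨r, hr⟩ := hb
  rcases Nat.lt_or_ge j key.length with hlt | hge
  · have hkj : u[j]? = some key[j] := by
      rw [← hr, List.append_assoc, List.getElem?_append_left (by omega : j < key.length)]
      exact List.getElem?_eq_getElem hlt
    rw [hkj] at hhead
    have : ('[' : Char) = key[j] := by injection hhead.symm
    exact hk (this ▸ List.getElem_mem hlt)
  · have hj' : j = key.length := by omega
    have hkj : u[j]? = some ']' := by
      rw [← hr, List.getElem?_append_left (by simp; omega), hj',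
        List.getElem?_append_right (by omega : key.length ≤ key.length)]
      simp
    rw [hkj] at hhead
    have : (']' : Char) = '[' := by injection hhead
    exact absurd this (by decide)

lemma pvSepPrefixToken (key : List Char) : pvSep <+: pvToken key := by
  exact ⟨key ++ [']'], by simp [pvToken]⟩

lemma pvPOS {key s u : List Char} {i p : Nat} (hocc : FirstOccPV pvSep s i)
    (hu : u = s.drop (i + 8)) (hp : pvToken key <+: s.drop p) :
    (p = i ∧ (key ++ [']']) <+: u) ∨ (i + 8 ≤ p ∧ pvToken key <+: u.drop (p - i - 8)) := by
  have hsp : pvSep <+: s.drop p := (pvSepPrefixToken key).trans hp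
  have hpi : ¬ p < i := fun hlt => hocc.2 p hlt hsp
  have hdecomp : s.drop i = pvSep ++ u := by
    have h0 := pvFirstOcc_drop_eq hocc
    rw [hu, show pvSep.length = 8 from by decide] at *
    exact h0
  rcases Nat.lt_or_ge p (i + 8) with hlt | hge
  · rcases Nat.eq_or_lt_of_le (Nat.le_of_not_lt hpi) with heq | hgt
    · left
      refine ⟨heq.symm, ?_⟩
      have hp2 : pvToken key <+: pvSep ++ u := by
        rw [← hdecomp, heq]; exact hp
      have hp3 : pvSep ++ (key ++ [']']) <+: pvSep ++ u := by
        simpa [pvToken, List.append_assoc] using hp2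
      exact (List.prefix_append_right_inj pvSep).mp hp3
    · exfalso
      have hd1 : 1 ≤ p - i := by omega
      have hd2 : p - i < 8 := by omega
      have hsp2 : pvSep <+: (pvSep.drop (p - i) ++ u) := by
        have hdd : s.drop p = (s.drop i).drop (p - i) := by
          rw [List.drop_drop]; congr 1; omega
        rw [hdd, hdecomp,
          List.drop_append_of_le_length (by rw [show pvSep.length = 8 from by decide]; omega)] at hsp
        exact hsp
      exact pvNoSepInSep (p - i) u hd1 hd2 hsp2
  · right
    refine ⟨hge, ?_⟩
    have hdd : s.drop p = u.drop (p - i - 8) := by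
      rw [hu, List.drop_drop]; congr 1; omega
    rwa [hdd] at hp

lemma pvCutSep_pos {w : List Char} {m : Nat} (h : FirstOccPV pvSep w m) : cutSepPV w = w.take m := by
  have hf := pvFind_eq h
  unfold cutSepPV
  rw [hf, if_pos (by omega : (0:Int) ≤ (m : Int))]
  simp

lemma pvCutSep_neg {w : List Char} (h : ¬ pvSep <:+: w) : cutSepPV w = w := by
  unfold cutSepPV
  rw [(PySem.Chars.find_eq_neg_one_iff w pvSep).mpr h,
    if_neg (by omega : ¬ (0:Int) ≤ -1)]

lemma pvMatch_pos {key c : List Char} (hk : ']' ∉ key) (h : (key ++ [']']) <+: c) :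
    PySem.Chars.find c [']'] = (key.length : Int) ∧ c.take key.length = key := by
  obtain ⟨r, hr⟩ := h
  have hocc : FirstOccPV [']'] c key.length := by
    constructor
    · have hdr : c.drop key.length = ']' :: r := by
        rw [← hr, show (key ++ [']'] ++ r) = key ++ (']' :: r) from by simp, List.drop_left]
      rw [hdr]
      exact ⟨r, rfl⟩
    · intro j hj hpre
      have hhead : (c.drop j).head? = some ']' := by
        have hpre2 : (']' :: ([] : List Char)) <+: c.drop j := by simpa using hpre
        obtain ⟨r2, hr2⟩ := hpre2
        rw [← hr2]; rfl
      have hkj : (c.drop j).head? = some key[j] := by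
        rw [List.head?_drop, ← hr, List.append_assoc,
          List.getElem?_append_left (by omega : j < key.length)]
        exact List.getElem?_eq_getElem hj
      rw [hkj] at hhead
      have heq : (']' : Char) = key[j] := by injection hhead.symm
      exact hk (heq ▸ List.getElem_mem hj)
  refine ⟨pvFind_eq hocc, ?_⟩
  rw [← hr, List.append_assoc]
  exact List.take_left

lemma pvMatch_rev {key c : List Char} (h1 : 0 ≤ PySem.Chars.find c [']'])
    (h2 : c.take (PySem.Chars.find c [']']).toNat = key) : (key ++ [']']) <+: c := by
  obtain ⟨hpre, -⟩ := PySem.Chars.find_spec h1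
  have hdrop : c.drop (PySem.Chars.find c [']']).toNat =
      ']' :: c.drop ((PySem.Chars.find c [']']).toNat + 1) := by
    obtain ⟨r, hr⟩ := hpre
    have hth := congrArg List.tail hr
    simp only [List.tail_drop] at hth
    have hr2 : r = c.drop ((PySem.Chars.find c [']']).toNat + 1) := by
      rw [← hth]; rfl
    rw [← hr, hr2]
    rfl
  refine ⟨c.drop ((PySem.Chars.find c [']']).toNat + 1), ?_⟩
  calc key ++ [']'] ++ c.drop ((PySem.Chars.find c [']']).toNat + 1)
      = c.take (PySem.Chars.find c [']']).toNat ++ (']' :: c.drop ((PySem.Chars.find c [']']).toNat + 1)) := by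
        rw [h2]; simp
    _ = c.take (PySem.Chars.find c [']']).toNat ++ c.drop (PySem.Chars.find c [']']).toNat := by
        rw [hdrop]
    _ = c := List.take_append_drop _ c

lemma pvFirstMatch_cons (key c : List Char) (cs : List (List Char)) :
    firstMatchPV key (c :: cs) =
      if 0 ≤ PySem.Chars.find c [']'] ∧ c.take (PySem.Chars.find c [']']).toNat = key
      then PySem.Chars.strip (c.drop ((PySem.Chars.find c [']']).toNat + 1))
      else firstMatchPV key cs := by
  have hsl : ("]".toList : List Char) = [']'] := by decide
  show (let close := PySem.Chars.find c "]".toList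
      if close ≠ -1 ∧ PySem.List.slice c none (some close) = key
      then PySem.Chars.strip (PySem.List.slice c (some (close + 1)) none)
      else firstMatchPV key cs) = _
  simp only [hsl]
  by_cases h1 : 0 ≤ PySem.Chars.find c [']']
  · have hne : PySem.Chars.find c [']'] ≠ -1 := by omega
    have hslice : PySem.List.slice c none (some (PySem.Chars.find c [']'])) =
        c.take (PySem.Chars.find c [']']).toNat := PySem.List.slice_to c h1
    have hslice2 : PySem.List.slice c (some (PySem.Chars.find c [']'] + 1)) none =
        c.drop ((PySem.Chars.find c [']']).toNat + 1) := by
      rw [PySem.List.slice_from c (by omega : (0:Int) ≤ PySem.Chars.find c [']'] + 1)]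
      congr 1
      omega
    by_cases h2 : c.take (PySem.Chars.find c [']']).toNat = key
    · rw [if_pos ⟨hne, by rw [hslice]; exact h2⟩, if_pos ⟨h1, h2⟩, hslice2]
    · rw [if_neg (by rw [hslice]; exact fun hx => h2 hx.2), if_neg (fun hx => h2 hx.2)]
  · have hm1 : PySem.Chars.find c [']'] = -1 := by
      have := PySem.Chars.neg_one_le_find c [']']
      omega
    rw [if_neg (by rw [hm1]; simp), if_neg (fun hx => h1 hx.1)]

lemma pvTR {key s : List Char} {i : Nat} (hk1 : '[' ∉ key) (hk2 : ']' ∉ key)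
    (hocc : FirstOccPV pvSep s i) :
    grabExpPV s key = auxSpecPV (s.drop (i + 8)) key := by
  have h8 : pvSep.length = 8 := by decide
  have htoklen : (pvToken key).length = 8 + key.length + 1 := by
    simp [pvToken, pvSep]
    omega
  by_cases hb1 : (key ++ [']']) <+: s.drop (i + 8)
  · have htocc : FirstOccPV (pvToken key) s i := by
      constructor
      · have hdecomp : s.drop i = pvSep ++ s.drop (i + 8) := by
          have h0 := pvFirstOcc_drop_eq hocc
          rw [h8] at h0
          exact h0
        rw [hdecomp]
        have := (List.prefix_append_right_inj pvSep).mpr hb1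
        simpa [pvToken, List.append_assoc] using this
      · intro j hj hpre
        exact hocc.2 j hj ((pvSepPrefixToken key).trans hpre)
    have hf := pvFind_eq htocc
    unfold grabExpPV
    rw [hf, if_pos (by omega : (0:Int) ≤ (i : Int))]
    unfold auxSpecPV
    rw [if_pos hb1]
    have hargs : s.drop (((i : Int)).toNat + (pvToken key).length) =
        (s.drop (i + 8)).drop (key.length + 1) := by
      rw [List.drop_drop, Int.toNat_natCast, htoklen]
      congr 1
      omega
    rw [hargs]
  · have haux : auxSpecPV (s.drop (i + 8)) key = grabExpPV (s.drop (i + 8)) key := by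
      unfold auxSpecPV
      rw [if_neg hb1]
    rw [haux]
    by_cases hb2 : 0 ≤ PySem.Chars.find (s.drop (i + 8)) (pvToken key)
    · have huocc : FirstOccPV (pvToken key) (s.drop (i + 8))
          (PySem.Chars.find (s.drop (i + 8)) (pvToken key)).toNat :=
        pvFirstOcc_of_infix ((PySem.Chars.find_nonneg_iff _ _).mp hb2)
      have hsocc : FirstOccPV (pvToken key) s
          (i + 8 + (PySem.Chars.find (s.drop (i + 8)) (pvToken key)).toNat) := by
        constructor
        · have h1 := huocc.1
          rw [List.drop_drop] at h1
          exact h1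
        · intro p hp hpre
          rcases pvPOS hocc rfl hpre with ⟨hpe, hpb⟩ | ⟨hpge, hpre2⟩
          · exact hb1 hpb
          · exact huocc.2 (p - i - 8) (by omega) hpre2
      have hf := pvFind_eq hsocc
      unfold grabExpPV
      rw [hf, if_pos (by omega : (0:Int) ≤ ((i + 8 + (PySem.Chars.find (s.drop (i + 8)) (pvToken key)).toNat : Nat) : Int)),
        if_pos hb2]
      have hargs : s.drop ((((i + 8 + (PySem.Chars.find (s.drop (i + 8)) (pvToken key)).toNat : Nat) : Int)).toNat + (pvToken key).length) =
          (s.drop (i + 8)).drop ((PySem.Chars.find (s.drop (i + 8)) (pvToken key)).toNat + (pvToken key).length) := by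
        rw [List.drop_drop, Int.toNat_natCast]
        congr 1
        omega
      rw [hargs]
    · have hno : ¬ 0 ≤ PySem.Chars.find s (pvToken key) := by
        intro hpos
        have hinf := (PySem.Chars.find_nonneg_iff s (pvToken key)).mp hpos
        obtain ⟨p, hp⟩ := (pvInfix_exists _ s).mp hinf
        rcases pvPOS hocc rfl hp with ⟨_, hpb⟩ | ⟨_, hpre2⟩
        · exact hb1 hpb
        · exact hb2 ((PySem.Chars.find_nonneg_iff _ _).mpr ((pvInfix_exists _ _).mpr ⟨_, hpre2⟩))
      unfold grabExpPV
      rw [if_neg hno, if_neg hb2]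

lemma pvL_noSep {key u : List Char} (hk1 : '[' ∉ key) (hk2 : ']' ∉ key) (hin : ¬ pvSep <:+: u) :
    firstMatchPV key (PySem.Chars.splitOn u pvSep) = auxSpecPV u key := by
  rw [pvSplitOn_neg (by decide : pvSep ≠ []) hin, pvFirstMatch_cons]
  by_cases hb1 : (key ++ [']']) <+: u
  · obtain ⟨hf, ht⟩ := pvMatch_pos hk2 hb1
    have hcond : 0 ≤ PySem.Chars.find u [']'] ∧
        u.take (PySem.Chars.find u [']']).toNat = key := by
      rw [hf]
      exact ⟨by omega, by simpa using ht⟩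
    rw [if_pos hcond]
    unfold auxSpecPV
    rw [if_pos hb1, pvCutSep_neg (pvNotInfix_drop hin _), hf]
    simp
  · rw [if_neg (fun hx => hb1 (pvMatch_rev hx.1 hx.2))]
    have hno : ¬ 0 ≤ PySem.Chars.find u (pvToken key) := by
      intro hpos
      exact hin ((pvSepPrefixToken key).isInfix.trans
        ((PySem.Chars.find_nonneg_iff _ _).mp hpos))
    unfold auxSpecPV grabExpPV
    rw [if_neg hb1, if_neg hno]
    rfl

lemma pvL_hit {key u : List Char} {i : Nat} (hk1 : '[' ∉ key) (hk2 : ']' ∉ key)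
    (hocc : FirstOccPV pvSep u i) (hb : (key ++ [']']) <+: u) :
    firstMatchPV key (PySem.Chars.splitOn u pvSep) = auxSpecPV u key := by
  have hge : key.length + 1 ≤ i := by
    by_contra hlt
    exact pvNoSepEarly hk1 hb i (by omega) hocc.1
  rw [pvSplitOn_pos pvSep (by decide) i u hocc, pvFirstMatch_cons]
  have hbc : (key ++ [']']) <+: u.take i :=
    List.prefix_take_iff.mpr ⟨hb, by simp; omega⟩
  obtain ⟨hf, ht⟩ := pvMatch_pos hk2 hbc
  have hcond : 0 ≤ PySem.Chars.find (u.take i) [']'] ∧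
      (u.take i).take (PySem.Chars.find (u.take i) [']']).toNat = key := by
    rw [hf]
    exact ⟨by omega, by simpa using ht⟩
  rw [if_pos hcond]
  unfold auxSpecPV
  rw [if_pos hb]
  have hwocc : FirstOccPV pvSep (u.drop (key.length + 1)) (i - (key.length + 1)) :=
    pvFirstOcc_shift hocc hge
  rw [pvCutSep_pos hwocc, hf]
  rw [Int.toNat_natCast, List.drop_take]

lemma pvLaux (key : List Char) (hk1 : '[' ∉ key) (hk2 : ']' ∉ key) :
    ∀ (n : Nat) (u : List Char), u.length ≤ n →
      firstMatchPV key (PySem.Chars.splitOn u pvSep) = auxSpecPV u key := by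
  intro n
  induction n with
  | zero =>
    intro u hlen
    cases u with
    | nil =>
      exact pvL_noSep hk1 hk2 (fun hx => (by decide : pvSep ≠ []) (List.infix_nil.mp hx))
    | cons a t => simp at hlen
  | succ n ih =>
    intro u hlen
    by_cases hin : pvSep <:+: u
    · have hocc := pvFirstOcc_of_infix hin
      by_cases hb1 : (key ++ [']']) <+: u
      · exact pvL_hit hk1 hk2 hocc hb1
      · rw [pvSplitOn_pos pvSep (by decide) _ u hocc, pvFirstMatch_cons]
        have hnm : ¬ (0 ≤ PySem.Chars.find (u.take (PySem.Chars.find u pvSep).toNat) [']'] ∧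
            (u.take (PySem.Chars.find u pvSep).toNat).take
              (PySem.Chars.find (u.take (PySem.Chars.find u pvSep).toNat) [']']).toNat = key) := by
          intro hx
          exact hb1 ((pvMatch_rev hx.1 hx.2).trans (List.take_prefix _ u))
        rw [if_neg hnm]
        have hlen8 : 8 ≤ u.length := by
          have h1 := hocc.1.length_le
          rw [show pvSep.length = 8 from by decide] at h1
          simp only [List.length_drop] at h1
          omega
        have h8 : pvSep.length = 8 := by decide
        rw [h8]
        have hrec := ih (u.drop ((PySem.Chars.find u pvSep).toNat + 8))
          (by simp only [List.length_drop]; omega)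
        rw [hrec]
        have haux : auxSpecPV u key = grabExpPV u key := by
          unfold auxSpecPV
          rw [if_neg hb1]
        rw [haux, pvTR hk1 hk2 hocc]
    · exact pvL_noSep hk1 hk2 hin

lemma pvFind?_of_not_contains {d : PySem.Dict (List Char) (List Char)} {k : List Char}
    (h : d.contains k = false) : d.items.find? (fun p => p.1 == k) = none := by
  have h2 : ∀ p ∈ d.items, ¬ (p.1 == k) = true := by
    intro p hp hbeq
    have hc : d.contains k = true := by
      simp only [PySem.Dict.contains]
      exact List.any_eq_true.mpr ⟨p, hp, hbeq⟩
    rw [hc] at h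
    exact absurd h (by decide)
  exact List.find?_eq_none.mpr h2

lemma pvContains_setdefault_mono {d : PySem.Dict (List Char) (List Char)} {k k' v : List Char}
    (h : d.contains k = true) : (d.setdefault k' v).contains k = true := by
  unfold PySem.Dict.setdefault
  split_ifs with hc
  · exact h
  · simp only [PySem.Dict.contains] at h ⊢
    simp [List.any_append, h]

lemma pvContains_setdefault_other {d : PySem.Dict (List Char) (List Char)} {k k' v : List Char}
    (hne : k' ≠ k) : (d.setdefault k' v).contains k = d.contains k := by
  unfold PySem.Dict.setdefault
  split_ifs with hc
  · rfl
  · simp only [PySem.Dict.contains]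
    simp [List.any_append, hne]

lemma pvGetD_setdefault_of_contains {d : PySem.Dict (List Char) (List Char)} {k k' v x : List Char}
    (h : d.contains k = true) : (d.setdefault k' v).getD k x = d.getD k x := by
  unfold PySem.Dict.setdefault
  split_ifs with hc
  · rfl
  · have hfind : (d.items.find? (fun p => p.1 == k)).isSome := by
      rw [List.find?_isSome]
      simpa [PySem.Dict.contains, List.any_eq_true] using h
    obtain ⟨q, hq⟩ := Option.isSome_iff_exists.mp hfind
    simp [PySem.Dict.getD, PySem.Dict.get?, List.find?_append, hq]

lemma pvSetdefault_getD_self {d : PySem.Dict (List Char) (List Char)} {k v : List Char}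
    (h : d.contains k = false) : (d.setdefault k v).getD k [] = v := by
  unfold PySem.Dict.setdefault
  rw [if_neg (by simp [h])]
  simp [PySem.Dict.getD, PySem.Dict.get?, List.find?_append, pvFind?_of_not_contains h]

lemma pvSetdefault_contains_self (d : PySem.Dict (List Char) (List Char)) (k v : List Char) :
    (d.setdefault k v).contains k = true := by
  unfold PySem.Dict.setdefault
  split_ifs with hc
  · exact hc
  · simp [PySem.Dict.contains, List.any_append]

lemma pvFold_getD (key : List Char) : ∀ (chunks : List (List Char)) (d : PySem.Dict (List Char) (List Char)),
    (chunks.foldl (fun regions chunk =>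
        let close := PySem.Chars.find chunk "]".toList
        if close ≠ -1 then
          PySem.Dict.setdefault regions (PySem.List.slice chunk none (some close))
            (PySem.Chars.strip (PySem.List.slice chunk (some (close + 1)) none))
        else regions) d).getD key []
      = if d.contains key then d.getD key [] else firstMatchPV key chunks := by
  intro chunks
  induction chunks with
  | nil =>
    intro d
    simp only [List.foldl_nil]
    cases hc : d.contains key with
    | false =>
      rw [if_neg (show ¬ false = true by simp)]
      show (d.get? key).getD [] = firstMatchPV key []
      rw [show d.get? key = (d.items.find? (fun p => p.1 == key)).map (fun x => x.2) from rfl,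
        pvFind?_of_not_contains hc]
      rfl
    | true => rw [if_pos rfl]
  | cons c cs ihc =>
    intro d
    simp only [List.foldl_cons]
    have ihc' : ∀ (d : PySem.Dict (List Char) (List Char)),
        (List.foldl (fun (regions : PySem.Dict (List Char) (List Char)) (chunk : List Char) =>
            if PySem.Chars.find chunk "]".toList ≠ -1 then
              PySem.Dict.setdefault regions (PySem.List.slice chunk none (some (PySem.Chars.find chunk "]".toList)))
                (PySem.Chars.strip (PySem.List.slice chunk (some (PySem.Chars.find chunk "]".toList + 1)) none))
            else regions) d cs).getD key []
          = if d.contains key then d.getD key [] else firstMatchPV key cs := fun d => ihc d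
    have hfm : firstMatchPV key (c :: cs)
      = (if PySem.Chars.find c "]".toList ≠ -1 ∧
            PySem.List.slice c none (some (PySem.Chars.find c "]".toList)) = key
         then PySem.Chars.strip (PySem.List.slice c (some (PySem.Chars.find c "]".toList + 1)) none)
         else firstMatchPV key cs) := rfl
    rw [hfm]
    by_cases hcl : PySem.Chars.find c "]".toList ≠ -1
    · rw [if_pos hcl]
      by_cases hcont : d.contains key = true
      · rw [ihc' _, if_pos (pvContains_setdefault_mono hcont),
          pvGetD_setdefault_of_contains hcont, if_pos hcont]
      · have hcf : d.contains key = false := by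
          cases h2 : d.contains key
          · rfl
          · exact absurd h2 hcont
        by_cases hk : PySem.List.slice c none (some (PySem.Chars.find c "]".toList)) = key
        · rw [hk, ihc' _, if_pos (pvSetdefault_contains_self d key _),
            pvSetdefault_getD_self hcf, if_neg hcont, if_pos ⟨hcl, rfl⟩]
        · rw [ihc' _, if_neg (by rw [pvContains_setdefault_other hk]; exact hcont),
            if_neg hcont, if_neg (fun hx => hk hx.2)]
    · rw [if_neg hcl, ihc' d,
        if_neg (show ¬ (PySem.Chars.find c "]".toList ≠ -1 ∧
          PySem.List.slice c none (some (PySem.Chars.find c "]".toList)) = key) from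
          fun hx => hcl hx.1)]

lemma pvRegionIndex_getD (page1 key : List Char) :
    (pvRegionIndex page1).getD key [] =
      firstMatchPV key ((PySem.Chars.splitOn page1 pvSep).drop 1) := by
  unfold pvRegionIndex
  have hsl : PySem.List.slice (PySem.Chars.splitOn page1 "[Region:".toList) (some 1) none
      = (PySem.Chars.splitOn page1 "[Region:".toList).drop 1 := by
    rw [PySem.List.slice_from _ (by omega : (0:Int) ≤ 1)]
    rfl
  have hemp : (PySem.Dict.empty : PySem.Dict (List Char) (List Char)).contains key = false := rfl
  rw [hsl, pvSep_eq, pvFold_getD, if_neg (by simp [hemp])]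

lemma pvGrabExp_eq (page1 reg : List Char) :
    pvGrabA page1 reg = grabExpPV page1 (' ' :: reg) := by
  simp only [pvGrabA, grabExpPV]
  have htok : ("[Region: ".toList ++ reg ++ "]".toList) = pvToken (' ' :: reg) := by
    rw [pvToken, show ("[Region: ".toList : List Char) = pvSep ++ [' '] from by decide,
      show ("]".toList : List Char) = [']'] from by decide]
    simp
  rw [htok, pvSep_eq]
  by_cases hin : pvToken (' ' :: reg) <:+: page1
  · rw [if_neg (by simp [(PySem.Chars.isIn_iff_infix _ _).mpr hin])]
    have hpos : 0 ≤ PySem.Chars.find page1 (pvToken (' ' :: reg)) :=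
      (PySem.Chars.find_nonneg_iff _ _).mpr hin
    rw [if_pos hpos]
    have hocc := pvFirstOcc_of_infix hin
    rw [pvSplitMax1_pos (by simp [pvToken] : pvToken (' ' :: reg) ≠ []) hocc]
    have hg1 : ∀ (a b : List Char), List.getD [a, b] 1 ([] : List Char) = b := fun a b => rfl
    rw [hg1]
    unfold cutSepPV
    by_cases h2 : 0 ≤ PySem.Chars.find (page1.drop ((PySem.Chars.find page1 (pvToken (' ' :: reg))).toNat + (pvToken (' ' :: reg)).length)) pvSep
    · have hocc2 := pvFirstOcc_of_infix ((PySem.Chars.find_nonneg_iff _ _).mp h2)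
      rw [pvSplitMax1_pos (by decide : pvSep ≠ []) hocc2, if_pos h2]
      rfl
    · rw [pvSplitMax1_neg (by decide : pvSep ≠ [])
        (fun hx => h2 ((PySem.Chars.find_nonneg_iff _ _).mpr hx)), if_neg h2]
      rfl
  · rw [if_pos ((PySem.Chars.isIn_eq_false_iff _ _).mpr hin),
      if_neg (by rw [(PySem.Chars.find_eq_neg_one_iff _ _).mpr hin]; omega)]

lemma pvLtop {page1 key : List Char} (hk1 : '[' ∉ key) (hk2 : ']' ∉ key) :
    grabExpPV page1 key = firstMatchPV key ((PySem.Chars.splitOn page1 pvSep).drop 1) := by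
  by_cases hin : pvSep <:+: page1
  · have hocc := pvFirstOcc_of_infix hin
    have h8 : pvSep.length = 8 := by decide
    rw [pvSplitOn_pos pvSep (by decide) _ page1 hocc, h8]
    simp only [List.drop_one, List.tail_cons]
    rw [pvLaux key hk1 hk2 (page1.drop ((PySem.Chars.find page1 pvSep).toNat + 8)).length _ le_rfl]
    exact pvTR hk1 hk2 hocc
  · rw [pvSplitOn_neg (by decide : pvSep ≠ []) hin]
    have hno : ¬ 0 ≤ PySem.Chars.find page1 (pvToken key) := by
      intro hpos
      exact hin ((pvSepPrefixToken key).isInfix.trans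
        ((PySem.Chars.find_nonneg_iff _ _).mp hpos))
    unfold grabExpPV
    rw [if_neg hno]
    rfl

lemma pvGrab_eq (page1 reg : List Char) (h1 : '[' ∉ reg) (h2 : ']' ∉ reg) :
    pvGrabA page1 reg = (pvRegionIndex page1).getD (' ' :: reg) [] := by
  have hk1 : '[' ∉ (' ' :: reg) := by
    intro hx
    rcases List.mem_cons.mp hx with h | h
    · exact absurd h (by decide)
    · exact h1 h
  have hk2 : ']' ∉ (' ' :: reg) := by
    intro hx
    rcases List.mem_cons.mp hx with h | h
    · exact absurd h (by decide)
    · exact h2 h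
  rw [pvGrabExp_eq, pvLtop hk1 hk2, ← pvRegionIndex_getD]

set_option maxHeartbeats 2000000 in
lemma pvComposeGen (F L R : List Char) (fb sb rb mc : Int) :
    (let parts := ["[Page 1]".toList]
     let parts := if F ≠ [] then parts ++ ["[Region: full]".toList, PySem.Chars.rstrip (PySem.List.slice F none (some fb))] else parts
     let parts := if L ≠ [] then parts ++ ["[Region: left]".toList, PySem.Chars.rstrip (PySem.List.slice L none (some sb))] else parts
     let parts := if R ≠ [] then parts ++ ["[Region: right]".toList, PySem.Chars.rstrip (PySem.List.slice R none (some rb))] else parts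
     let composed := PySem.Chars.strip (PySem.Chars.join "\n".toList (parts.filter (fun p => p ≠ [])))
     let composed := if mc < (composed.length : Int) then PySem.Chars.rstrip (PySem.List.slice composed none (some mc)) else composed
     String.ofList composed)
    =
    (let parts := ["[Page 1]".toList]
     let parts := if F ≠ [] then (let parts2 := parts ++ ["[Region: full]".toList]; let t := PySem.Chars.rstrip (PySem.List.slice F none (some fb)); if t ≠ [] then parts2 ++ [t] else parts2) else parts
     let parts := if L ≠ [] then (let parts2 := parts ++ ["[Region: left]".toList]; let t := PySem.Chars.rstrip (PySem.List.slice L none (some sb)); if t ≠ [] then parts2 ++ [t] else parts2) else parts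
     let parts := if R ≠ [] then (let parts2 := parts ++ ["[Region: right]".toList]; let t := PySem.Chars.rstrip (PySem.List.slice R none (some rb)); if t ≠ [] then parts2 ++ [t] else parts2) else parts
     let composed := PySem.Chars.strip (PySem.Chars.join "\n".toList parts)
     let composed := if mc < (composed.length : Int) then PySem.Chars.rstrip (PySem.List.slice composed none (some mc)) else composed
     String.ofList composed) := by
  have hh0 : ("[Page 1]".toList : List Char) ≠ [] := by decide
  have hhf : ("[Region: full]".toList : List Char) ≠ [] := by decide
  have hhl : ("[Region: left]".toList : List Char) ≠ [] := by decide
  have hhr : ("[Region: right]".toList : List Char) ≠ [] := by decide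
  set tF := PySem.Chars.rstrip (PySem.List.slice F none (some fb)) with htFd
  set tL := PySem.Chars.rstrip (PySem.List.slice L none (some sb)) with htLd
  set tR := PySem.Chars.rstrip (PySem.List.slice R none (some rb)) with htRd
  by_cases hFe : F = [] <;> by_cases hLe : L = [] <;> by_cases hRe : R = [] <;>
    by_cases htF : tF = [] <;> by_cases htL : tL = [] <;> by_cases htR : tR = [] <;>
      simp [hFe, hLe, hRe, htF, htL, htR, hh0, hhf, hhl, hhr, List.filter_append, List.filter]

set_option maxHeartbeats 2000000 in
lemma pvCompose (page1 : List Char) (mc : Int) :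
    (let full := pvGrabA page1 "full".toList
     let left := pvGrabA page1 "left".toList
     let right := pvGrabA page1 "right".toList
     let full_budget := pyIntTimesFloat mc 3602879701896397 53
     let side_budget := pyIntTimesFloat mc 1261007895663739 52
     let right_budget := mc - (("[Page 1]\n[Region: full]\n".toList.length : Int) + full_budget + ("\n[Region: left]\n".toList.length : Int) + side_budget + ("\n[Region: right]\n".toList.length : Int))
     let right_budget := max 80 (min (pyIntTimesFloat mc 5764607523034235 54) right_budget)
     let parts := ["[Page 1]".toList]
     let parts := if full ≠ [] then parts ++ ["[Region: full]".toList, PySem.Chars.rstrip (PySem.List.slice full none (some full_budget))] else parts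
     let parts := if left ≠ [] then parts ++ ["[Region: left]".toList, PySem.Chars.rstrip (PySem.List.slice left none (some side_budget))] else parts
     let parts := if right ≠ [] then parts ++ ["[Region: right]".toList, PySem.Chars.rstrip (PySem.List.slice right none (some right_budget))] else parts
     let composed := PySem.Chars.strip (PySem.Chars.join "\n".toList (parts.filter (fun p => p ≠ [])))
     let composed := if mc < (composed.length : Int) then PySem.Chars.rstrip (PySem.List.slice composed none (some mc)) else composed
     String.ofList composed)
    =
    (let regions := pvRegionIndex page1
     let full_budget := pyIntTimesFloat mc 3602879701896397 53
     let side_budget := pyIntTimesFloat mc 1261007895663739 52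
     let right_budget := max 80 (min (pyIntTimesFloat mc 5764607523034235 54) (mc - 57 - full_budget - side_budget))
     let parts := [("full".toList, full_budget), ("left".toList, side_budget), ("right".toList, right_budget)].foldl
       (fun parts nb =>
         let seg := PySem.Dict.getD regions (" ".toList ++ nb.1) []
         if seg ≠ [] then
           let parts := parts ++ ["[Region: ".toList ++ nb.1 ++ "]".toList]
           let trimmed := PySem.Chars.rstrip (PySem.List.slice seg none (some nb.2))
           if trimmed ≠ [] then parts ++ [trimmed] else parts
         else parts)
       ["[Page 1]".toList]
     let composed := PySem.Chars.strip (PySem.Chars.join "\n".toList parts)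
     let composed := if mc < (composed.length : Int) then PySem.Chars.rstrip (PySem.List.slice composed none (some mc)) else composed
     String.ofList composed) := by
  have hfull := pvGrab_eq page1 "full".toList (by decide) (by decide)
  have hleft := pvGrab_eq page1 "left".toList (by decide) (by decide)
  have hright := pvGrab_eq page1 "right".toList (by decide) (by decide)
  have hkf : (" ".toList ++ "full".toList) = (' ' :: "full".toList) := by decide
  have hkl : (" ".toList ++ "left".toList) = (' ' :: "left".toList) := by decide
  have hkr : (" ".toList ++ "right".toList) = (' ' :: "right".toList) := by decide
  have hhf : ("[Region: ".toList ++ "full".toList ++ "]".toList) = "[Region: full]".toList := by decide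
  have hhl : ("[Region: ".toList ++ "left".toList ++ "]".toList) = "[Region: left]".toList := by decide
  have hhr : ("[Region: ".toList ++ "right".toList ++ "]".toList) = "[Region: right]".toList := by decide
  have hlen1 : (("[Page 1]\n[Region: full]\n".toList.length : Int)) = 24 := by decide
  have hlen2 : (("\n[Region: left]\n".toList.length : Int)) = 16 := by decide
  have hlen3 : (("\n[Region: right]\n".toList.length : Int)) = 17 := by decide
  simp only [List.foldl_cons, List.foldl_nil, hfull, hleft, hright, hkf, hkl, hkr, hhf, hhl, hhr,
    hlen1, hlen2, hlen3]
  have hbud : mc - (24 + pyIntTimesFloat mc 3602879701896397 53 + 16 +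
        pyIntTimesFloat mc 1261007895663739 52 + 17)
      = mc - 57 - pyIntTimesFloat mc 3602879701896397 53 - pyIntTimesFloat mc 1261007895663739 52 := by
    ring
  rw [hbud]
  exact pvComposeGen ((pvRegionIndex page1).getD (' ' :: "full".toList) [])
    ((pvRegionIndex page1).getD (' ' :: "left".toList) [])
    ((pvRegionIndex page1).getD (' ' :: "right".toList) [])
    (pyIntTimesFloat mc 3602879701896397 53) (pyIntTimesFloat mc 1261007895663739 52)
    (max 80 (min (pyIntTimesFloat mc 5764607523034235 54)
      (mc - 57 - pyIntTimesFloat mc 3602879701896397 53 - pyIntTimesFloat mc 1261007895663739 52))) mc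

-- ===== VERDICT (by name: the statement is the Claim_ definition above) =====
set_option maxHeartbeats 1000000 in
theorem build_layout_aware_preview_spec : Claim_equal_build_layout_aware_preview := by
  unfold Claim_equal_build_layout_aware_preview
  intro text mc _
  unfold Spec_build_layout_aware_preview
  simp only [build_layout_aware_preview, build_layout_aware_preview_alt]
  by_cases hnil : text.toList = []
  · rw [hnil]
    have hiR : PySem.Chars.isIn "[Region:".toList ([] : List Char) = false := by decide
    rw [if_pos rfl, hiR]
    rw [show (false && PySem.Chars.isIn "[Page 1]".toList ([] : List Char)) = false from rfl]
    rw [if_pos rfl]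
    have hsl : (if mc < ((([] : List Char)).length : Int)
        then PySem.List.slice ([] : List Char) none (some mc) else ([] : List Char)) = [] := by
      split_ifs with h
      · simp [PySem.List.slice]
      · rfl
    rw [hsl]
    rfl
  · rw [if_neg hnil]
    by_cases hg : (PySem.Chars.isIn "[Region:".toList text.toList &&
        PySem.Chars.isIn "[Page 1]".toList text.toList) = false
    · rw [if_pos hg, if_pos hg]
    · rw [if_neg hg, if_neg hg]
      set p1 := (PySem.Chars.splitOnMax text.toList "[Page 1]".toList 1).getD 1 [] with hp1
      have hpage : (if PySem.Chars.isIn "\n\n[Page ".toList p1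
            then (PySem.Chars.splitOnMax p1 "\n\n[Page ".toList 1).getD 0 [] else p1)
          = (PySem.Chars.splitOnMax p1 "\n\n[Page ".toList 1).getD 0 [] := by
        split_ifs with h
        · rfl
        · rw [pvSplitMax1_neg (by decide : ("\n\n[Page ".toList : List Char) ≠ [])
            ((PySem.Chars.isIn_eq_false_iff _ _).mp (Bool.not_eq_true _ ▸ Bool.eq_false_iff.mpr h))]
          rfl
      rw [hpage]
      exact pvCompose ((PySem.Chars.splitOnMax p1 "\n\n[Page ".toList 1).getD 0 []) mc
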